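-- pv_equiv track=rewrite | github.com/vivek100/deepclaws | scripts/sqlite_to_postgres_sql.py | map_sqlite_type
-- ===== SOURCE A (Python) =====
-- def map_sqlite_type(type_name: str) -> str:
--     normalized = (type_name or "").upper()
--     if "INT" in normalized:
--         return "BIGINT"
--     if any(token in normalized for token in ("REAL", "FLOA", "DOUB")):
--         return "DOUBLE PRECISION"
--     if "NUM" in normalized or "DEC" in normalized:
--         return "NUMERIC"
--     if "BOOL" in normalized:
--         return "BOOLEAN"
--     if "BLOB" in normalized:
--         return "BYTEA"
--     return "TEXT"
-- ===== SOURCE B (Python) =====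
-- # Different strategy than an ordered first-match chain: score every token that
-- # occurs anywhere in the normalized name with a priority rank, take the BEST
-- # (minimum) rank over all occurrences, and index a result table with it.
-- TOKEN_RANKS = [("INT", 0), ("REAL", 1), ("FLOA", 1), ("DOUB", 1),
--                ("NUM", 2), ("DEC", 2), ("BOOL", 3), ("BLOB", 4)]
-- RESULTS = ["BIGINT", "DOUBLE PRECISION", "NUMERIC", "BOOLEAN", "BYTEA", "TEXT"]
--
--
-- def _occurs(tok, s):
--     return any(s.startswith(tok, i) for i in range(len(s)))
--
--
-- def map_sqlite_type(type_name: str) -> str: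
--     s = (type_name or "").upper()
--     best = min((rank for tok, rank in TOKEN_RANKS if _occurs(tok, s)), default=5)
--     return RESULTS[best]
-- ===== Notes on version B (the rewrite author's own statement) =====
-- stated objective: alternative
-- what changed: Instead of an ordered first-match if-chain, B scores every token that occurs anywhere in the normalized name with a priority rank, takes the minimum rank over all occurrences (default 5), and indexes a result table with it; occurrence itself is tested by scanning start positions rather than by the substring operator.
import Mathlib
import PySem

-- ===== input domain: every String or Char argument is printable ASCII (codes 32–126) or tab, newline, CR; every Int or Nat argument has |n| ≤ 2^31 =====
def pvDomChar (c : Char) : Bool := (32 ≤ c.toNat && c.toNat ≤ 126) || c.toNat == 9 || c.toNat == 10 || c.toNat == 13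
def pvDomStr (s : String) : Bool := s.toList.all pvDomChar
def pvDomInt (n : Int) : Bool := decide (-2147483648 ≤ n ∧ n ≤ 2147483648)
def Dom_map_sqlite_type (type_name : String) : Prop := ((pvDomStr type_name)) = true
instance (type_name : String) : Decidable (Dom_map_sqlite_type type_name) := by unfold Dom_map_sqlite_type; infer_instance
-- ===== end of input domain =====

-- B replaces A's ordered first-match if-chain by a min-rank scoring of all occurring tokens (alternative decomposition, same cost).


-- ===== PORT A =====
def map_sqlite_type (type_name : String) : String :=
  let normalized := PySem.Str.upper type_name
  if PySem.Str.isIn "INT" normalized then "BIGINT"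
  else if ["REAL", "FLOA", "DOUB"].any (fun token => PySem.Str.isIn token normalized) then "DOUBLE PRECISION"
  else if PySem.Str.isIn "NUM" normalized || PySem.Str.isIn "DEC" normalized then "NUMERIC"
  else if PySem.Str.isIn "BOOL" normalized then "BOOLEAN"
  else if PySem.Str.isIn "BLOB" normalized then "BYTEA"
  else "TEXT"

-- ===== PORT B =====
def pvTokenRanks : List (String × Nat) :=
  [("INT", 0), ("REAL", 1), ("FLOA", 1), ("DOUB", 1),
   ("NUM", 2), ("DEC", 2), ("BOOL", 3), ("BLOB", 4)]

def pvResults : List String :=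
  ["BIGINT", "DOUBLE PRECISION", "NUMERIC", "BOOLEAN", "BYTEA", "TEXT"]

-- _occurs(tok, s): any(s.startswith(tok, i) for i in range(len(s)));
-- for 0 ≤ i, Python s.startswith(tok, i) is exactly 'drop i of s starts with tok'
def pvOccurs (tok s : String) : Bool :=
  (List.range s.toList.length).any
    (fun i => PySem.Chars.startswith (s.toList.drop i) tok.toList)

def map_sqlite_type_alt (type_name : String) : String :=
  let s := PySem.Str.upper type_name
  let best := ((pvTokenRanks.filterMap
      (fun tr => if pvOccurs tr.1 s then some tr.2 else none)).min?).getD 5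
  -- RESULTS[best]: best ≤ 5 always, so the index is in range
  (PySem.List.pyGet? pvResults (best : Int)).getD "TEXT"

-- ===== PRECONDITION & SPEC =====
def Spec_map_sqlite_type (type_name : String) (out : String) : Prop := out = map_sqlite_type_alt type_name
instance (type_name : String) (out : String) : Decidable (Spec_map_sqlite_type type_name out) := by unfold Spec_map_sqlite_type; infer_instance

-- ===== CLAIM (what is proved, stated in full; the proofs are below) =====
def Claim_equal_map_sqlite_type : Prop := ∀ (type_name : String), Dom_map_sqlite_type type_name → Spec_map_sqlite_type type_name (map_sqlite_type type_name)

-- ===== LEMMAS AND PROOFS =====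

-- a nonempty token occurs at some start position < len(s) iff it is a substring
theorem pvOccurs_eq_isIn (tok s : String) (h : tok.toList ≠ []) :
    pvOccurs tok s = PySem.Str.isIn tok s := by
  rw [Bool.eq_iff_iff]
  unfold pvOccurs
  rw [PySem.Str.isIn_iff_infix]
  constructor
  · intro h'
    simp only [List.any_eq_true, List.mem_range] at h'
    obtain ⟨i, _, hsw⟩ := h'
    rw [PySem.Chars.startswith_iff] at hsw
    exact hsw.isInfix.trans (List.drop_suffix i s.toList).isInfix
  · intro hinf
    obtain ⟨p, q, hpq⟩ := hinf
    have hdrop : s.toList.drop p.length = tok.toList ++ q := by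
      rw [← hpq, List.append_assoc, List.drop_left]
    have hlen : p.length < s.toList.length := by
      have := congrArg List.length hpq
      simp only [List.length_append] at this
      have htok : 0 < tok.toList.length := List.length_pos_iff.mpr h
      omega
    simp only [List.any_eq_true, List.mem_range]
    exact ⟨p.length, hlen, by
      rw [PySem.Chars.startswith_iff, hdrop]; exact ⟨q, rfl⟩⟩

-- ===== VERDICT (by name: the statement is the Claim_ definition above) =====
theorem map_sqlite_type_spec : Claim_equal_map_sqlite_type := by
  intro t _
  unfold Spec_map_sqlite_type map_sqlite_type map_sqlite_type_alt pvTokenRanks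
  simp only [List.filterMap_cons, List.filterMap_nil, List.any_cons, List.any_nil,
    Bool.or_false]
  rw [pvOccurs_eq_isIn "INT" _ (by decide), pvOccurs_eq_isIn "REAL" _ (by decide),
      pvOccurs_eq_isIn "FLOA" _ (by decide), pvOccurs_eq_isIn "DOUB" _ (by decide),
      pvOccurs_eq_isIn "NUM" _ (by decide), pvOccurs_eq_isIn "DEC" _ (by decide),
      pvOccurs_eq_isIn "BOOL" _ (by decide), pvOccurs_eq_isIn "BLOB" _ (by decide)]
  generalize PySem.Str.isIn "INT" (PySem.Str.upper t) = b1
  generalize PySem.Str.isIn "REAL" (PySem.Str.upper t) = b2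
  generalize PySem.Str.isIn "FLOA" (PySem.Str.upper t) = b3
  generalize PySem.Str.isIn "DOUB" (PySem.Str.upper t) = b4
  generalize PySem.Str.isIn "NUM" (PySem.Str.upper t) = b5
  generalize PySem.Str.isIn "DEC" (PySem.Str.upper t) = b6
  generalize PySem.Str.isIn "BOOL" (PySem.Str.upper t) = b7
  generalize PySem.Str.isIn "BLOB" (PySem.Str.upper t) = b8
  revert b1 b2 b3 b4 b5 b6 b7 b8
  decide
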